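-- pv_equiv track=rewrite | github.com/micheledalonzo/rThink | rThinkFunctions.py | StdCar
-- ===== SOURCE A (Python) =====
-- def StdCar(stringa):
--     #gL.log(gL.DEBUG)
--     if isinstance(stringa, list):
--         clean = stringa[0]
--     else:
--         clean = stringa
--     CaratteriVietati = ['#', '(', ')', '/', '.', '-', ';',  '"']
--     for ch in CaratteriVietati:
--         if ch in clean:
--             clean = clean.replace(ch, "")
--     clean = " ".join(clean.split())
--     stringa = clean.strip()
--     return stringa
-- ===== SOURCE B (Python) =====
-- def StdCar(stringa):
--     if isinstance(stringa, list):
--         clean = stringa[0]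
--     else:
--         clean = stringa
--     kept = ''.join(c for c in clean if c not in '#()/.-;"')
--     return ' '.join(kept.split()).strip()
-- ===== Notes on version B (the rewrite author's own statement) =====
-- stated objective: idiomatic
-- what changed: Replaces the loop of up to 8 sequential membership-test + str.replace scans over the whole string with a single filtering pass that keeps only allowed characters; the final whitespace normalization is unchanged.
import Mathlib
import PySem

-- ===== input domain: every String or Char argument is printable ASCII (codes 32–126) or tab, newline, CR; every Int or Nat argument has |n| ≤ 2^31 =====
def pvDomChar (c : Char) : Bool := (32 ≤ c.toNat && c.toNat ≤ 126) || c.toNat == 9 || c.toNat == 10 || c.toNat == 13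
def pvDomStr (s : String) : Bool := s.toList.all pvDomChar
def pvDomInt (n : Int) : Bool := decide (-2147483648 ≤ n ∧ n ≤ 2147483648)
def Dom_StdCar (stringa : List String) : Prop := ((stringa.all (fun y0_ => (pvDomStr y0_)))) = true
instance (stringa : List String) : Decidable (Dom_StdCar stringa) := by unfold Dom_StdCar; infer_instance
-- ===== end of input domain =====

-- B removes the forbidden characters in ONE filtering pass instead of A's per-character replace loop;
-- the list unwrap and the final whitespace normalization are identical.

-- ===== PORT A =====
def pvForbiddenA : List String := ["#", "(", ")", "/", ".", "-", ";", "\""]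

def StdCar (stringa : List String) : String :=
  -- stringa is a list here, so the isinstance branch always takes stringa[0]; [] is excluded by Pre_
  let clean := (PySem.List.pyGet? stringa 0).getD ""
  let clean := pvForbiddenA.foldl
    (fun cl ch => if PySem.Str.isIn ch cl then PySem.Str.replace cl ch "" else cl) clean
  let clean := PySem.Str.join " " (PySem.Str.split₀ clean)
  PySem.Str.strip clean

-- ===== PORT B =====
def StdCar_alt (stringa : List String) : String :=
  let clean := (PySem.List.pyGet? stringa 0).getD ""
  -- ''.join(c for c in clean if c not in '#()/.-;"')
  let kept := String.ofList (clean.toList.filter (fun c => !("#()/.-;\"".toList.contains c)))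
  PySem.Str.strip (PySem.Str.join " " (PySem.Str.split₀ kept))

-- ===== PRECONDITION & SPEC =====
-- A raises IndexError on the empty list (stringa[0]); those inputs are excluded.
def Pre_StdCar (stringa : List String) : Prop := stringa ≠ []
instance (stringa : List String) : Decidable (Pre_StdCar stringa) := by unfold Pre_StdCar; infer_instance
def pvWitness_StdCar : List String := ["a#b  c."]

def Spec_StdCar (stringa : List String) (out : String) : Prop := out = StdCar_alt stringa
instance (stringa : List String) (out : String) : Decidable (Spec_StdCar stringa out) := by unfold Spec_StdCar; infer_instance

-- ===== CLAIM (what is proved, stated in full; the proofs are below) =====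
def Claim_equal_StdCar : Prop := ∀ (stringa : List String), Dom_StdCar stringa → Pre_StdCar stringa → Spec_StdCar stringa (StdCar stringa)

-- ===== LEMMAS AND PROOFS =====

-- replace.go with a single-char pattern and empty replacement is a filter
theorem pv_replace_go_filter (c : Char) :
    ∀ (fuel : Nat) (l acc : List Char), l.length ≤ fuel →
      PySem.Chars.replace.go [c] [] fuel l acc = acc.reverse ++ l.filter (fun x => x != c) := by
  intro fuel
  induction fuel with
  | zero =>
    intro l acc h
    have : l = [] := List.length_eq_zero_iff.mp (Nat.le_zero.mp h)
    subst this
    simp [PySem.Chars.replace.go]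
  | succ n ih =>
    intro l acc h
    cases l with
    | nil => simp [PySem.Chars.replace.go]
    | cons x t =>
      by_cases hx : x = c
      · subst hx
        have hpre : List.isPrefixOf [x] (x :: t) = true := by
          simp [List.isPrefixOf]
        simp only [PySem.Chars.replace.go, hpre, if_pos, List.length_cons, List.drop_succ_cons,
          List.drop_zero, List.reverse_nil, List.nil_append, List.length_nil]
        rw [ih t acc (by simpa using h)]
        simp
      · have hpre : List.isPrefixOf [c] (x :: t) = false := by
          simp [List.isPrefixOf]
          exact fun he => hx he.symm
        simp only [PySem.Chars.replace.go, hpre, Bool.false_eq_true, if_false]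
        rw [ih t (x :: acc) (by simpa using h)]
        simp [hx]

theorem pv_replace_filter (c : Char) (l : List Char) :
    PySem.Chars.replace l [c] [] = l.filter (fun x => x != c) := by
  simp only [PySem.Chars.replace, List.isEmpty_cons, Bool.false_eq_true, if_false]
  exact pv_replace_go_filter c l.length l [] le_rfl

-- one step of A's loop (on toList) is a filter, whether or not the branch fires
theorem pv_step_filter (c : Char) (cl : String) :
    (if PySem.Str.isIn (String.ofList [c]) cl then PySem.Str.replace cl (String.ofList [c]) "" else cl).toList
      = cl.toList.filter (fun x => x != c) := by
  by_cases h : PySem.Str.isIn (String.ofList [c]) cl = true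
  · rw [if_pos h]
    rw [PySem.Str.toList_replace, String.toList_ofList]
    have : ("" : String).toList = [] := rfl
    rw [this]
    exact pv_replace_filter c cl.toList
  · rw [if_neg h]
    symm
    apply List.filter_eq_self.mpr
    intro x hx
    simp only [bne_iff_ne, ne_eq]
    intro he
    subst he
    exact h ((PySem.Str.isIn_iff_infix _ _).mpr
      (by rw [String.toList_ofList]; exact (List.singleton_infix_iff x cl.toList).mpr hx))

-- A's whole loop (over any list of single-char forbidden strings) is one filter
theorem pv_loop_gen (chs : List Char) :
    ∀ (cl : String),
      ((chs.map (fun c => String.ofList [c])).foldl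
        (fun cl ch => if PySem.Str.isIn ch cl then PySem.Str.replace cl ch "" else cl) cl).toList
      = cl.toList.filter (fun x => !(chs.contains x)) := by
  induction chs with
  | nil => intro cl; simp
  | cons m rest ih =>
    intro cl
    simp only [List.map_cons, List.foldl_cons]
    rw [ih, pv_step_filter]
    rw [List.filter_filter]
    apply List.filter_congr
    intro x _
    by_cases hxm : x = m <;> simp [hxm]

-- ===== VERDICT (by name: the statement is the Claim_ definition above) =====
theorem StdCar_spec : Claim_equal_StdCar := by
  intro stringa _ _
  show StdCar stringa = StdCar_alt stringa
  have key : (pvForbiddenA.foldl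
      (fun cl ch => if PySem.Str.isIn ch cl then PySem.Str.replace cl ch "" else cl)
      ((PySem.List.pyGet? stringa 0).getD ""))
      = String.ofList (((PySem.List.pyGet? stringa 0).getD "").toList.filter
          (fun c => !("#()/.-;\"".toList.contains c))) := by
    apply String.toList_inj.mp
    rw [String.toList_ofList]
    have hforb : pvForbiddenA
        = (['#', '(', ')', '/', '.', '-', ';', '"'].map (fun c => String.ofList [c])) := rfl
    rw [hforb, pv_loop_gen]
    rfl
  simp only [StdCar, StdCar_alt, key]
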